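-- pv_equiv track=rewrite | github.com/hyunlord/worldsim-training | training/lib/qlora_smoke.py | _json_object_complete
-- ===== SOURCE A (Python) =====
-- def _json_object_complete(text: str) -> bool:
--     depth = 0
--     in_string = False
--     escape = False
--     saw_open = False
--
--     for char in text:
--         if in_string:
--             if escape:
--                 escape = False
--             elif char == "\\":
--                 escape = True
--             elif char == "\"":
--                 in_string = False
--             continue
--
--         if char == "\"":
--             in_string = True
--         elif char == "{":
--             depth += 1
--             saw_open = True
--         elif char == "}":
--             depth -= 1
--             if saw_open and depth == 0:
--                 return True
--
--     return False
-- ===== SOURCE B (Python) =====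
-- def _json_object_complete(text: str) -> bool:
--     # Stage 1: extract the structural braces, dropping quoted string bodies.
--     braces = []
--     it = iter(text)
--     for c in it:
--         if c == '"':
--             for d in it:
--                 if d == '\\':
--                     next(it, None)
--                 elif d == '"':
--                     break
--         elif c in '{}':
--             braces.append(c)
--     # Stage 2: the object is complete iff the brace-delta prefix sum
--     # returns to zero at some '}' (a '{' necessarily occurred before it).
--     depth = 0
--     for c in braces:
--         depth += 1 if c == '{' else -1
--         if depth == 0 and c == '}':
--             return True
--     return False
-- ===== Notes on version B (the rewrite author's own statement) =====
-- stated objective: alternative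
-- what changed: Replaced A's single pass with four state flags by two staged passes: first extract the structural brace characters (dropping quoted string bodies), then a separate prefix-sum scan over the extracted braces; the saw_open flag is removed, justified by the invariant that the depth can only return to zero at a closing brace after some opening brace.
import Mathlib
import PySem

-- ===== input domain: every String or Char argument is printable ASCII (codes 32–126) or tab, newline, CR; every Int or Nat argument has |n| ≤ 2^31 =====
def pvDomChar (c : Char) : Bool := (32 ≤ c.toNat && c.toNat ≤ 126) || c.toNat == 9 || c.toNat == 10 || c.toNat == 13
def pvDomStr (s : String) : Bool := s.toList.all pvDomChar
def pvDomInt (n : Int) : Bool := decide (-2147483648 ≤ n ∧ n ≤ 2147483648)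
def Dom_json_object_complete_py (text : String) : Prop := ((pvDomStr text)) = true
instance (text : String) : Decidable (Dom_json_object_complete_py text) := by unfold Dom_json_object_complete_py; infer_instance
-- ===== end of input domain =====

-- B replaces A's four-flag single pass by two staged passes (extract the structural braces, then a
-- prefix-sum scan without the saw_open flag); same cost, different decomposition (objective: alternative).

-- ===== PORT A =====
-- A's for-loop over the characters with state (depth, in_string, escape, saw_open) and early return.
def pvLoopA : List Char → Int → Bool → Bool → Bool → Bool
  | [], _, _, _, _ => false
  | c :: rest, depth, inStr, esc, saw =>
    if inStr then
      if esc then pvLoopA rest depth inStr false saw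
      else if c = '\\' then pvLoopA rest depth inStr true saw
      else if c = '"' then pvLoopA rest depth false esc saw
      else pvLoopA rest depth inStr esc saw
    else if c = '"' then pvLoopA rest depth true esc saw
    else if c = '{' then pvLoopA rest (depth + 1) inStr esc true
    else if c = '}' then
      if saw && decide (depth - 1 = 0) then true
      else pvLoopA rest (depth - 1) inStr esc saw
    else pvLoopA rest depth inStr esc saw

def json_object_complete_py (text : String) : Bool :=
  pvLoopA text.toList 0 false false false

-- ===== PORT B =====
-- B stage 1, inner loop: advance past a quoted string body (backslash also consumes the next char).
def pvSkipStr : List Char → List Char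
  | [] => []
  | c :: rest =>
    if c = '\\' then
      match rest with
      | [] => []
      | _ :: r => pvSkipStr r
    else if c = '"' then rest
    else pvSkipStr rest

theorem pvSkipStr_cons (c : Char) (rest : List Char) :
    pvSkipStr (c :: rest) =
      (if c = '\\' then
        (match rest with
         | [] => []
         | _ :: r => pvSkipStr r)
      else if c = '"' then rest
      else pvSkipStr rest) := by rw [pvSkipStr.eq_def]

theorem pvSkipStr_len : ∀ (n : ℕ) (cs : List Char), cs.length ≤ n →
    (pvSkipStr cs).length ≤ cs.length := by
  intro n
  induction n with
  | zero =>
    intro cs h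
    cases cs with
    | nil => simp [pvSkipStr]
    | cons c rest => simp at h
  | succ n ih =>
    intro cs h
    cases cs with
    | nil => simp [pvSkipStr]
    | cons c rest =>
      simp only [List.length_cons, Nat.succ_le_succ_iff] at h
      rw [pvSkipStr_cons]
      by_cases hb : c = '\\'
      · cases rest with
        | nil => simp [hb]
        | cons d r =>
          have hr : r.length ≤ n := by simp at h ⊢; omega
          have := ih r hr
          simp [hb]
          omega
      · by_cases hq : c = '"'
        · simp [hq]
        · have := ih rest h
          simp [hb, hq]
          omega

theorem pvSkipStr_length_le (cs : List Char) : (pvSkipStr cs).length ≤ cs.length :=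
  pvSkipStr_len cs.length cs le_rfl

-- B stage 1, outer loop: the list of structural brace characters of the text.
def pvExtract : List Char → List Char
  | [] => []
  | c :: rest =>
    if c = '"' then pvExtract (pvSkipStr rest)
    else if c = '{' then '{' :: pvExtract rest
    else if c = '}' then '}' :: pvExtract rest
    else pvExtract rest
termination_by cs => cs.length
decreasing_by
  · exact Nat.lt_succ_of_le (pvSkipStr_length_le rest)
  · simp
  · simp
  · simp

-- B stage 2: prefix-sum scan over the braces with early return.
def pvCheck : List Char → Int → Bool
  | [], _ => false
  | c :: rest, depth =>
    let d := depth + (if c = '{' then 1 else -1)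
    if d = 0 ∧ c = '}' then true else pvCheck rest d

def json_object_complete_py_alt (text : String) : Bool :=
  pvCheck (pvExtract text.toList) 0

-- ===== PRECONDITION & SPEC =====
def Spec_json_object_complete_py (text : String) (out : Bool) : Prop := out = json_object_complete_py_alt text
instance (text : String) (out : Bool) : Decidable (Spec_json_object_complete_py text out) := by unfold Spec_json_object_complete_py; infer_instance

-- ===== CLAIM (what is proved, stated in full; the proofs are below) =====
def Claim_equal_json_object_complete_py : Prop := ∀ (text : String), Dom_json_object_complete_py text → Spec_json_object_complete_py text (json_object_complete_py text)

-- ===== LEMMAS AND PROOFS =====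

theorem pvExtract_cons (c : Char) (rest : List Char) :
    pvExtract (c :: rest) =
      (if c = '"' then pvExtract (pvSkipStr rest)
      else if c = '{' then '{' :: pvExtract rest
      else if c = '}' then '}' :: pvExtract rest
      else pvExtract rest) := by rw [pvExtract.eq_def]

theorem pvCheck_cons (c : Char) (rest : List Char) (depth : Int) :
    pvCheck (c :: rest) depth =
      (if depth + (if c = '{' then 1 else -1) = 0 ∧ c = '}' then true
      else pvCheck rest (depth + (if c = '{' then 1 else -1))) := rfl

-- Joint invariant, by strong induction on the length: with saw = true ∨ depth ≤ 0
-- (so depth can only be 1 before a '}' if a '{' occurred, making saw_open redundant),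
-- A's scan from "outside a string" equals B's staged computation, and A's scan from
-- "inside a string" equals B's staged computation on the text after the skip loop.
theorem pvLoopAB : ∀ (n : ℕ) (cs : List Char), cs.length ≤ n → ∀ (depth : Int) (saw : Bool),
    (saw = true ∨ depth ≤ 0) →
    pvLoopA cs depth false false saw = pvCheck (pvExtract cs) depth ∧
    pvLoopA cs depth true false saw = pvCheck (pvExtract (pvSkipStr cs)) depth := by
  intro n
  induction n with
  | zero =>
    intro cs h
    have : cs = [] := List.eq_nil_of_length_eq_zero (Nat.le_zero.mp h)
    subst this
    simp [pvLoopA, pvExtract, pvSkipStr, pvCheck]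
  | succ n ih =>
    intro cs h depth saw hinv
    cases cs with
    | nil => simp [pvLoopA, pvExtract, pvSkipStr, pvCheck]
    | cons c rest =>
      simp only [List.length_cons, Nat.succ_le_succ_iff] at h
      constructor
      · rw [pvExtract_cons]
        by_cases hq : c = '"'
        · subst hq
          simp only [pvLoopA]
          norm_num
          exact (ih rest h depth saw hinv).2
        · by_cases ho : c = '{'
          · subst ho
            simp only [pvLoopA, if_neg hq]
            norm_num
            rw [pvCheck_cons]
            rw [if_pos rfl, if_neg (by rintro ⟨-, hcon⟩; exact absurd hcon (by decide))]
            exact (ih rest h (depth + 1) true (Or.inl rfl)).1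
          · by_cases hc : c = '}'
            · subst hc
              simp only [pvLoopA, if_neg hq, if_neg ho]
              norm_num
              rw [pvCheck_cons, if_neg ho]
              by_cases hd : depth - 1 = 0
              · have hsaw : saw = true := by
                  rcases hinv with h1 | h1
                  · exact h1
                  · omega
                have hz : depth + -1 = 0 := by omega
                rw [if_pos ⟨hz, rfl⟩]
                simp [hd, hsaw]
              · have hinv' : saw = true ∨ depth - 1 ≤ 0 := by
                  rcases hinv with h1 | h1
                  · exact Or.inl h1
                  · right; omega
                rw [if_neg (by rintro ⟨h1, -⟩; exact hd (by omega))]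
                rw [show depth + -1 = depth - 1 by ring]
                simp only [hd, decide_false, Bool.and_false, Bool.false_or]
                exact (ih rest h (depth - 1) saw hinv').1
            · simp only [pvLoopA, if_neg hq, if_neg ho, if_neg hc,
                Bool.false_eq_true, if_false]
              exact (ih rest h depth saw hinv).1
      · by_cases hb : c = '\\'
        · subst hb
          cases rest with
          | nil => simp [pvLoopA, pvSkipStr, pvExtract, pvCheck]
          | cons d r =>
            have hr : r.length ≤ n := by simp at h; omega
            rw [pvSkipStr_cons]
            simp only [pvLoopA]
            simp
            exact (ih r hr depth saw hinv).2
        · by_cases hq : c = '"'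
          · subst hq
            rw [pvSkipStr_cons]
            simp only [pvLoopA]
            simp
            exact (ih rest h depth saw hinv).1
          · rw [pvSkipStr_cons]
            simp only [pvLoopA]
            simp [hb, hq]
            exact (ih rest h depth saw hinv).2

-- ===== VERDICT (by name: the statement is the Claim_ definition above) =====
theorem json_object_complete_py_spec : Claim_equal_json_object_complete_py := by
  intro text _
  unfold Spec_json_object_complete_py json_object_complete_py json_object_complete_py_alt
  exact (pvLoopAB text.toList.length text.toList le_rfl 0 false (Or.inr le_rfl)).1
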